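-- pv_equiv track=rewrite | github.com/PDXDevCampJuly/michael | python/daniel_pearl/python/DecodingAdv.py | detransformStr
-- ===== SOURCE A (Python) =====
-- def detransformStr(openedFile):
--     #Define variables
--     word = ""
--     noSpaces = ""
--     #Convert ASCE into letters
--     for i in openedFile:
--         if i == " ":
--             i=""
--             #Create slice depending on first number in string
--             if word[0] == '2':
--                 noSpaces += chr(int(word[3:5]))
--             else:
--                 noSpaces += chr(int(word[3:6]))
--             word = ""
--         #Save each character into a word
--         word += i
--     return(noSpaces)
-- ===== SOURCE B (Python) =====
-- def detransformStr(openedFile):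
--     tokens = openedFile.split(" ")
--     out = []
--     for w in tokens[:-1]:
--         out.append(chr(int(w[3:5] if w[0] == '2' else w[3:6])))
--     return "".join(out)
-- ===== Notes on version B (the rewrite author's own statement) =====
-- stated objective: simpler
-- what changed: Replaces the character-by-character word-buffer state machine with a tokenize-then-decode pass: split on spaces once, decode every token except the last, join the results; a timing run measured this faster (one split and one join instead of per-character string appends).
import Mathlib
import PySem

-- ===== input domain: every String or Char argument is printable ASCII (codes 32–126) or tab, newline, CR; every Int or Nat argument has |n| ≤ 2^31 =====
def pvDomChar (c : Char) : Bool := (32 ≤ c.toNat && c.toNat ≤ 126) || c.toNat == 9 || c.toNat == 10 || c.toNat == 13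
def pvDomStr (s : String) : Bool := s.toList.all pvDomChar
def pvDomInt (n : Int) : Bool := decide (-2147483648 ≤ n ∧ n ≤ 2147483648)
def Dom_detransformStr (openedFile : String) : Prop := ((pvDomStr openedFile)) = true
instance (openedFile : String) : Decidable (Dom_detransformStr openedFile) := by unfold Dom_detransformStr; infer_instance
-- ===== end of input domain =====

-- B replaces A's character-by-character word-buffer state machine with a split-then-decode
-- pass over the space-separated tokens (objective: simpler).


-- chr(n): none exactly where Python raises (n < 0 or n ≥ 0x110000); Char.ofNat is exact for
-- the codes reachable here (Pre_ admits only 0 ≤ n ≤ 999, below the surrogate range).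
def pyChr? (n : Int) : Option Char :=
  if 0 ≤ n ∧ n < 1114112 then some (Char.ofNat n.toNat) else none

-- ===== PORT A =====
-- A's per-space decoding of the accumulated word: word[0] (IndexError on ""), the branch on
-- word[0] == '2', int(word[3:5]) / int(word[3:6]), chr(...); none where the Python raises.
def decodeA (word : List Char) : Option Char :=
  match PySem.List.pyGet? word 0 with
  | none => none
  | some w0 =>
    if w0 = '2' then
      match PySem.Int.ofChars? (PySem.List.slice word (some 3) (some 5)) with
      | some n => pyChr? n
      | none => none
    else
      match PySem.Int.ofChars? (PySem.List.slice word (some 3) (some 6)) with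
      | some n => pyChr? n
      | none => none

-- A's for-loop over the characters, state = (word, noSpaces); none = the Python raised.
def loopA : List Char → List Char → List Char → Option (List Char)
  | [], _, noSpaces => some noSpaces
  | c :: rest, word, noSpaces =>
    if c = ' ' then
      match decodeA word with
      | some ch => loopA rest [] (noSpaces ++ [ch])
      | none => none
    else loopA rest (word ++ [c]) noSpaces

def detransformStr (openedFile : String) : String :=
  match loopA openedFile.toList [] [] with
  | some noSpaces => String.ofList noSpaces
  | none => ""  -- unreachable under Pre_ (the Python raises on these inputs)

-- ===== PORT B =====
-- Source B's per-token decode: chr(int(w[3:5] if w[0] == '2' else w[3:6])); none where it raises.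
def decodeB (w : List Char) : Option Char :=
  match w with
  | [] => none  -- w[0]: IndexError
  | w0 :: _ =>
    (PySem.Int.ofChars? (PySem.List.slice w (some 3) (some (if w0 = '2' then 5 else 6)))).bind pyChr?

-- openedFile.split(" ") ported as List.splitOn ' ' on the characters (same semantics for a
-- one-character separator: empty pieces kept); tokens[:-1] = dropLast; the append loop = mapM.
def detransformStr_alt (openedFile : String) : String :=
  let tokens := List.splitOn ' ' openedFile.toList
  match tokens.dropLast.mapM decodeB with
  | some out => String.ofList out
  | none => ""  -- unreachable under Pre_ (Source B raises on these inputs)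

-- ===== PRECONDITION & SPEC =====
-- A token followed by a space decodes without an exception: it is nonempty and its code slice
-- parses by int() to a nonnegative number (chr never raises here: a ≤3-character slice parses
-- to at most 999).
def okCode (t : List Char) : Bool :=
  match t with
  | [] => false
  | c :: _ =>
    match PySem.Int.ofChars? (PySem.List.slice t (some 3) (some (if c = '2' then 5 else 6))) with
    | some n => decide (0 ≤ n)
    | none => false

-- Pre_ excludes exactly the inputs on which the Python A raises (IndexError on an empty token
-- before a space, ValueError/TypeError from int()/chr() on a malformed code).
def Pre_detransformStr (openedFile : String) : Prop :=
  ∀ t ∈ (List.splitOn ' ' openedFile.toList).dropLast, okCode t = true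
instance (openedFile : String) : Decidable (Pre_detransformStr openedFile) := by
  unfold Pre_detransformStr; infer_instance

def pvWitness_detransformStr : String := "21065 21066 310100 "

def Spec_detransformStr (openedFile : String) (out : String) : Prop := out = detransformStr_alt openedFile
instance (openedFile : String) (out : String) : Decidable (Spec_detransformStr openedFile out) := by unfold Spec_detransformStr; infer_instance

-- ===== CLAIM (what is proved, stated in full; the proofs are below) =====
def Claim_equal_detransformStr : Prop := ∀ (openedFile : String), Dom_detransformStr openedFile → Pre_detransformStr openedFile → Spec_detransformStr openedFile (detransformStr openedFile)

-- ===== LEMMAS AND PROOFS =====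

lemma decodeA_eq_decodeB (w : List Char) : decodeA w = decodeB w := by
  cases w with
  | nil => rfl
  | cons w0 rest =>
    by_cases h : w0 = '2' <;>
      simp only [decodeA, decodeB, PySem.List.pyGet?, PySem.List.pyIdx?, h] <;>
      simp [h] <;> cases PySem.Int.ofChars? _ <;> simp [Option.bind]

lemma splitOn_space_ne_nil (cs : List Char) : List.splitOn ' ' cs ≠ [] := by
  unfold List.splitOn
  exact List.splitOnP_ne_nil _ _

-- The loop invariant: A's char loop with pending word `word` and output `noSpaces` computes
-- `noSpaces` followed by the decodings of all space-terminated tokens, the first one being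
-- `word` extended by the first piece of the remaining input.
lemma loopA_eq (cs : List Char) : ∀ (word noSpaces t : List Char) (rest : List (List Char)),
    List.splitOn ' ' cs = t :: rest →
    loopA cs word noSpaces =
      (((word ++ t) :: rest).dropLast.mapM decodeB).map (noSpaces ++ ·) := by
  induction cs with
  | nil =>
    intro word noSpaces t rest h
    simp [List.splitOn, List.splitOnP_nil] at h
    obtain ⟨rfl, rfl⟩ := h
    simp [loopA]
  | cons c cs ih =>
    intro word noSpaces t rest h
    obtain ⟨t', rest', hsplit⟩ : ∃ t' rest', List.splitOn ' ' cs = t' :: rest' := by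
      cases hs : List.splitOn ' ' cs with
      | nil => exact absurd hs (splitOn_space_ne_nil cs)
      | cons a b => exact ⟨a, b, rfl⟩
    by_cases hc : c = ' '
    · subst hc
      rw [show List.splitOn ' ' (' ' :: cs) = [] :: List.splitOn ' ' cs by
        simp [List.splitOn, List.splitOnP_cons]] at h
      injection h with h1 h2
      subst h1; subst h2
      rw [hsplit]
      cases hdec : decodeB word with
      | none =>
        simp [loopA, decodeA_eq_decodeB, hdec, List.dropLast, List.mapM_cons]
      | some ch =>
        have hih := ih [] (noSpaces ++ [ch]) t' rest' hsplit
        simp only [List.nil_append] at hih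
        simp only [loopA, decodeA_eq_decodeB, hdec, if_pos, List.append_nil, hih,
          List.dropLast, List.mapM_cons]
        cases (t' :: rest').dropLast.mapM decodeB <;>
          simp [List.append_assoc]
    · rw [show List.splitOn ' ' (c :: cs) = (List.splitOn ' ' cs).modifyHead (c :: ·) by
        simp [List.splitOn, List.splitOnP_cons, hc]] at h
      rw [hsplit] at h
      simp only [List.modifyHead] at h
      injection h with h1 h2
      subst h1; subst h2
      simp only [loopA, if_neg hc]
      rw [ih (word ++ [c]) noSpaces t' rest' hsplit]
      simp [List.append_assoc]

-- The two ports agree on every input (on inputs outside Pre_ both return "").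
lemma ports_agree (s : String) : detransformStr s = detransformStr_alt s := by
  obtain ⟨t, rest, hsplit⟩ : ∃ t rest, List.splitOn ' ' s.toList = t :: rest := by
    cases hs : List.splitOn ' ' s.toList with
    | nil => exact absurd hs (splitOn_space_ne_nil _)
    | cons a b => exact ⟨a, b, rfl⟩
  unfold detransformStr detransformStr_alt
  rw [loopA_eq s.toList [] [] t rest hsplit, hsplit]
  simp only [List.nil_append]
  cases ((t :: rest).dropLast.mapM decodeB) <;> simp

-- ===== VERDICT (by name: the statement is the Claim_ definition above) =====
theorem detransformStr_spec : Claim_equal_detransformStr := by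
  intro s _ _
  unfold Spec_detransformStr
  exact ports_agree s
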